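-- pv_equiv track=rewrite | github.com/StarkAI3/MultiAgent | multi_agent_system.py | _extract_readme_content
-- ===== SOURCE A (Python) =====
-- def _extract_readme_content(result: str) -> str:
--     """Extract README content from the agent output"""
--     lines = result.split('\n')
--     in_markdown_block = False
--     readme_content = []
--
--     for line in lines:
--         if '```markdown' in line:
--             in_markdown_block = True
--             continue
--         elif '```' in line and in_markdown_block:
--             in_markdown_block = False
--             break
--         elif in_markdown_block:
--             readme_content.append(line)
--
--     return '\n'.join(readme_content) if readme_content else ""
-- ===== SOURCE B (Python) =====
-- def _extract_readme_content(result: str) -> str: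
--     """Declarative reformulation: compute the index sets of opening and closing
--     fence lines, then take the slice between the first opener and the first
--     subsequent closer and filter out opener lines.  No sequential state, no
--     break/continue."""
--     lines = result.split('\n')
--     opens = [i for i, l in enumerate(lines) if '```markdown' in l]
--     if not opens:
--         return ""
--     rest = lines[opens[0] + 1:]
--     closes = [k for k, l in enumerate(rest) if '```' in l and '```markdown' not in l]
--     body = rest[:closes[0]] if closes else rest
--     return '\n'.join(l for l in body if '```markdown' not in l)
-- ===== Notes on version B (the rewrite author's own statement) =====
-- stated objective: alternative
-- what changed: Replaces A's flag-driven sequential state machine (with continue/break) by a declarative index-set formulation: compute the list of opener-line indices and, in the suffix after the first opener, the list of closer-line indices, then slice to the first closer and filter out opener lines.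
import Mathlib
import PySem

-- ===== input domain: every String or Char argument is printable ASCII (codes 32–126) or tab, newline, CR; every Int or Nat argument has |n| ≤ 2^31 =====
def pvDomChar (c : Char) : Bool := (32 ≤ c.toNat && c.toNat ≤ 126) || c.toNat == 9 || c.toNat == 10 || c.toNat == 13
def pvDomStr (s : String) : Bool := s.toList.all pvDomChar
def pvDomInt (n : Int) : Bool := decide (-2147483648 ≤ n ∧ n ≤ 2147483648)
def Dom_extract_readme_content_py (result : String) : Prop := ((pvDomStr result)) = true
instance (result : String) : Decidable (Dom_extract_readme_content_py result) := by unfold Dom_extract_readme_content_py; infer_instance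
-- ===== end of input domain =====

-- B replaces A's flag-driven scanning state machine by a declarative
-- index-set formulation: opener/closer index lists, slice, filter (objective: alternative).

-- ===== PORT A =====
-- A's single loop over all lines carrying the in_markdown_block flag and the
-- accumulated content; 'break' = returning the accumulator.
def pvLoopA : List String → Bool → List String → List String
  | [], _, acc => acc
  | l :: ls, flag, acc =>
    if PySem.Str.isIn "```markdown" l then pvLoopA ls true acc
    else if PySem.Str.isIn "```" l && flag then acc
    else if flag then pvLoopA ls flag (acc ++ [l])
    else pvLoopA ls flag acc

def extract_readme_content_py (result : String) : String :=
  let lines := (PySem.Str.split? result "\n").getD []   -- sep = "\n" ≠ "", so split? is always some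
  let readme := pvLoopA lines false []
  if readme.isEmpty then "" else PySem.Str.join "\n" readme

-- ===== PORT B =====
-- Declarative: opener index list, suffix after the first opener, closer index
-- list of that suffix, slice to the first closer, filter out opener lines.
def extract_readme_content_py_alt (result : String) : String :=
  let lines := (PySem.Str.split? result "\n").getD []
  let opens := ((PySem.List.enumerate lines).filter
      (fun p => PySem.Str.isIn "```markdown" p.2)).map Prod.fst
  match opens with
  | [] => ""
  | i :: _ =>
    let rest := PySem.List.slice lines (some (i + 1)) none
    let closes := ((PySem.List.enumerate rest).filter
        (fun p => PySem.Str.isIn "```" p.2 && !PySem.Str.isIn "```markdown" p.2)).map Prod.fst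
    let body := match closes with
      | [] => rest
      | k :: _ => PySem.List.slice rest none (some k)
    PySem.Str.join "\n" (body.filter (fun l => !PySem.Str.isIn "```markdown" l))

-- ===== PRECONDITION & SPEC =====
def Spec_extract_readme_content_py (result : String) (out : String) : Prop := out = extract_readme_content_py_alt result
instance (result : String) (out : String) : Decidable (Spec_extract_readme_content_py result out) := by unfold Spec_extract_readme_content_py; infer_instance

-- ===== CLAIM =====
def Claim_equal_extract_readme_content_py : Prop := ∀ (result : String), Dom_extract_readme_content_py result → Spec_extract_readme_content_py result (extract_readme_content_py result)

-- ===== LEMMAS AND PROOFS =====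
-- first index (as a Nat) of a line satisfying p
def pvFirst (p : String → Bool) : List String → Option Nat
  | [] => none
  | l :: ls => if p l then some 0 else (pvFirst p ls).map (· + 1)

-- head of B's enumerate/filter/map-fst pipeline = pvFirst, shifted by the start
theorem pvEnumHead (p : String → Bool) (ls : List String) (s : Int) :
    (((PySem.List.enumerate ls s).filter (fun q => p q.2)).map Prod.fst).head?
      = Option.map (fun n : Nat => s + (n : Int)) (pvFirst p ls) := by
  induction ls generalizing s with
  | nil => simp [PySem.List.enumerate_nil, pvFirst]
  | cons l ls ih =>
    by_cases hp : p l
    · simp [PySem.List.enumerate_cons, pvFirst, hp]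
    · simp only [PySem.List.enumerate_cons, List.filter_cons, hp, Bool.false_eq_true,
        if_false, pvFirst, ih (s + 1)]
      cases pvFirst p ls
      · simp
      · simp; ring

-- once the flag is set, A's loop collects takeWhile-then-filter
theorem pvLoopA_true (ls : List String) (acc : List String) :
    pvLoopA ls true acc =
      acc ++ (ls.takeWhile (fun l => !(PySem.Str.isIn "```" l && !PySem.Str.isIn "```markdown" l))).filter
        (fun l => !PySem.Str.isIn "```markdown" l) := by
  induction ls generalizing acc with
  | nil => simp [pvLoopA]
  | cons l ls ih =>
    by_cases hm : PySem.Chars.isIn ['`','`','`','m','a','r','k','d','o','w','n'] l.toList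
    · simp [pvLoopA, hm, ih]
    · by_cases hb : PySem.Chars.isIn ['`','`','`'] l.toList
      · simp [pvLoopA, hm, hb]
      · simp [pvLoopA, hm, hb, ih]

-- A's loop with the flag unset: find the first opener, then collect after it
theorem pvLoopA_false (ls : List String) :
    pvLoopA ls false [] =
      (match pvFirst (fun l => PySem.Str.isIn "```markdown" l) ls with
       | none => []
       | some i =>
         ((ls.drop (i + 1)).takeWhile (fun l => !(PySem.Str.isIn "```" l && !PySem.Str.isIn "```markdown" l))).filter
           (fun l => !PySem.Str.isIn "```markdown" l)) := by
  induction ls with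
  | nil => rfl
  | cons l ls ih =>
    by_cases hm : PySem.Chars.isIn ['`','`','`','m','a','r','k','d','o','w','n'] l.toList
    · simp [pvLoopA, hm, pvFirst, pvLoopA_true]
    · have hm' : PySem.Str.isIn "```markdown" l = false := by simp [hm]
      have hstep : pvLoopA (l :: ls) false [] = pvLoopA ls false [] := by
        simp [pvLoopA, hm]
      rw [hstep, ih]
      simp only [pvFirst, hm', Bool.false_eq_true, if_false]
      cases pvFirst (fun l => PySem.Str.isIn "```markdown" l) ls
      · rfl
      · rfl

-- take-to-the-first-hit = takeWhile-no-hit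
theorem pvTakeFirst (p : String → Bool) (ls : List String) :
    (match pvFirst p ls with
     | none => ls
     | some k => ls.take k) = ls.takeWhile (fun l => !p l) := by
  induction ls with
  | nil => rfl
  | cons l ls ih =>
    by_cases hp : p l
    · simp [pvFirst, hp]
    · simp only [pvFirst, hp, Bool.false_eq_true, if_false, List.takeWhile_cons]
      rw [← ih]
      cases pvFirst p ls <;> simp

theorem pvJoinNil : PySem.Str.join "\n" [] = "" := by decide

-- the two final expressions agree, as functions of the split line list
theorem pvMainAux (lines : List String) :
    (let readme := pvLoopA lines false []
     if readme.isEmpty then "" else PySem.Str.join "\n" readme) =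
    (let opens := ((PySem.List.enumerate lines).filter
        (fun p => PySem.Str.isIn "```markdown" p.2)).map Prod.fst
     match opens with
     | [] => ""
     | i :: _ =>
       let rest := PySem.List.slice lines (some (i + 1)) none
       let closes := ((PySem.List.enumerate rest).filter
           (fun p => PySem.Str.isIn "```" p.2 && !PySem.Str.isIn "```markdown" p.2)).map Prod.fst
       let body := match closes with
         | [] => rest
         | k :: _ => PySem.List.slice rest none (some k)
       PySem.Str.join "\n" (body.filter (fun l => !PySem.Str.isIn "```markdown" l))) := by
  have hOpens := pvEnumHead (fun l => PySem.Str.isIn "```markdown" l) lines 0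
  beta_reduce at hOpens
  rw [pvLoopA_false]
  cases hF : pvFirst (fun l => PySem.Str.isIn "```markdown" l) lines with
  | none =>
    rw [hF, Option.map_none] at hOpens
    rcases hO : ((PySem.List.enumerate lines).filter
        (fun p => PySem.Str.isIn "```markdown" p.2)).map Prod.fst with _ | ⟨i, t⟩
    · rw [hO]
      rfl
    · rw [hO] at hOpens; simp at hOpens
  | some n =>
    rw [hF, Option.map_some] at hOpens
    rcases hO : ((PySem.List.enumerate lines).filter
        (fun p => PySem.Str.isIn "```markdown" p.2)).map Prod.fst with _ | ⟨i, t⟩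
    · rw [hO] at hOpens; simp at hOpens
    · rw [hO] at hOpens
      simp only [List.head?_cons, Option.some.injEq] at hOpens
      have hi : i = (n : Int) := by omega
      rw [hO]
      subst hi
      have hrest : PySem.List.slice lines (some ((n : Int) + 1)) none = lines.drop (n + 1) := by
        have hc : ((n : Int) + 1) = ((n + 1 : Nat) : Int) := by push_cast; ring
        rw [hc, PySem.List.slice_from_natCast]
      simp only [hrest]
      set rest := lines.drop (n + 1) with hrestdef
      have hCl := pvEnumHead (fun l => PySem.Str.isIn "```" l && !PySem.Str.isIn "```markdown" l) rest 0
      beta_reduce at hCl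
      have hBody : (match ((PySem.List.enumerate rest).filter
            (fun p => PySem.Str.isIn "```" p.2 && !PySem.Str.isIn "```markdown" p.2)).map Prod.fst with
          | [] => rest
          | k :: _ => PySem.List.slice rest none (some k))
          = rest.takeWhile (fun l => !(PySem.Str.isIn "```" l && !PySem.Str.isIn "```markdown" l)) := by
        rw [← pvTakeFirst (fun l => PySem.Str.isIn "```" l && !PySem.Str.isIn "```markdown" l)]
        cases hF2 : pvFirst (fun l => PySem.Str.isIn "```" l && !PySem.Str.isIn "```markdown" l) rest with
        | none =>
          rw [hF2, Option.map_none] at hCl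
          rcases hC : ((PySem.List.enumerate rest).filter
              (fun p => PySem.Str.isIn "```" p.2 && !PySem.Str.isIn "```markdown" p.2)).map Prod.fst with _ | ⟨k, t2⟩
          · rw [hC]
          · rw [hC] at hCl; simp at hCl
        | some m =>
          rw [hF2, Option.map_some] at hCl
          rcases hC : ((PySem.List.enumerate rest).filter
              (fun p => PySem.Str.isIn "```" p.2 && !PySem.Str.isIn "```markdown" p.2)).map Prod.fst with _ | ⟨k, t2⟩
          · rw [hC] at hCl; simp at hCl
          · rw [hC] at hCl
            simp only [List.head?_cons, Option.some.injEq] at hCl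
            have hk : k = (m : Int) := by omega
            rw [hC]
            subst hk
            show PySem.List.slice rest none (some ((m : Nat) : Int)) = rest.take m
            exact PySem.List.slice_to_natCast rest m
      simp only [hBody]
      rcases hE : ((rest.takeWhile fun l => !(PySem.Str.isIn "```" l && !PySem.Str.isIn "```markdown" l)).filter
          (fun l => !PySem.Str.isIn "```markdown" l)) with _ | ⟨x, xs⟩
      · simp [pvJoinNil]
      · simp

-- ===== VERDICT =====
theorem extract_readme_content_py_spec : Claim_equal_extract_readme_content_py := by
  unfold Claim_equal_extract_readme_content_py
  intro result _
  unfold Spec_extract_readme_content_py extract_readme_content_py extract_readme_content_py_alt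
  exact pvMainAux ((PySem.Str.split? result "\n").getD [])
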